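-- pv_equiv track=rewrite | github.com/SysAdminDoc/StreamKeep | streamkeep/resume.py | _sanitize_completed
-- ===== SOURCE A (Python) =====
-- def _sanitize_completed(value):
--     if not isinstance(value, (list, tuple, set)):
--         return []
--     cleaned = []
--     seen = set()
--     for item in value:
--         try:
--             idx = int(item)
--         except (TypeError, ValueError):
--             continue
--         if idx < 0 or idx in seen:
--             continue
--         seen.add(idx)
--         cleaned.append(idx)
--     return cleaned
-- ===== SOURCE B (Python) =====
-- def _sanitize_completed(value):
--     if not isinstance(value, (list, tuple, set)):
--         return []
--     converted = []
--     for item in value: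
--         try:
--             converted.append(int(item))
--         except (TypeError, ValueError):
--             pass
--     # backward pass: overwriting leaves each value mapped to its FIRST position
--     first = {}
--     for i, x in reversed(list(enumerate(converted))):
--         first[x] = i
--     # keep an element iff it is non-negative and sits at its first position
--     return [x for i, x in enumerate(converted) if x >= 0 and first[x] == i]
-- ===== Notes on version B (the rewrite author's own statement) =====
-- stated objective: alternative
-- what changed: Drops the seen-set dedup entirely: B makes a backward pass that overwrites a dict so each value maps to its first position, then selects exactly the non-negative elements that sit at their own first position, instead of A's single forward loop skipping via an incrementally grown seen-set.
import Mathlib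
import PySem

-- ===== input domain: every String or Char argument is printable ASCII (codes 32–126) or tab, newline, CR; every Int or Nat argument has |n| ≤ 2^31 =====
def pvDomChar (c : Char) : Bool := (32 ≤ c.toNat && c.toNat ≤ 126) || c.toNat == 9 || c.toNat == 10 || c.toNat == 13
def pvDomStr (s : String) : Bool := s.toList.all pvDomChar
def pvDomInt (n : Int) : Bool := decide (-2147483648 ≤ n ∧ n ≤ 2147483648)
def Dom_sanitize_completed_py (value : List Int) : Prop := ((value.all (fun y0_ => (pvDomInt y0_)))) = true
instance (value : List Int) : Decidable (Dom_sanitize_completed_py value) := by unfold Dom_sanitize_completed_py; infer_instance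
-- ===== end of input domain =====

-- B drops A's seen-set dedup: a backward pass overwrites a dict so each value maps to its first
-- position, then B keeps the non-negative elements sitting at their own first position.
-- ===== PORT A =====
-- loop over 'value' carrying 'cleaned' and the seen-set (int(item) is the identity on Int inputs, never raising)
def saLoop (rest : List Int) (cleaned : List Int) (seen : PySem.Set Int) : List Int :=
  match rest with
  | [] => cleaned
  | item :: rest =>
    if item < 0 ∨ PySem.Set.contains seen item = true then saLoop rest cleaned seen
    else saLoop rest (cleaned ++ [item]) (PySem.Set.add seen item)

def sanitize_completed_py (value : List Int) : List Int :=
  saLoop value [] PySem.Set.empty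

-- ===== PORT B =====
def sanitize_completed_py_alt (value : List Int) : List Int :=
  -- the 'converted' append loop (int(item) is the identity on Int inputs, never raising)
  let converted : List Int := value.foldl (fun acc item => acc ++ [item]) []
  -- backward pass over reversed(list(enumerate(converted))): first[x] = i, overwriting
  let first : PySem.Dict Int Int := (PySem.List.enumerate converted 0).reverse.foldl
      (fun d p => d.insert p.2 p.1) PySem.Dict.empty
  -- the comprehension: keep x at i iff x >= 0 and first[x] == i
  (PySem.List.enumerate converted 0).filterMap
    (fun (p : Int × Int) => if 0 ≤ p.2 ∧ PySem.Dict.get? first p.2 = some p.1 then some p.2 else none)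

-- ===== PRECONDITION & SPEC =====
def Spec_sanitize_completed_py (value : List Int) (out : List Int) : Prop := out = sanitize_completed_py_alt value
instance (value : List Int) (out : List Int) : Decidable (Spec_sanitize_completed_py value out) := by unfold Spec_sanitize_completed_py; infer_instance

-- ===== CLAIM (what is proved, stated in full; the proofs are below) =====
def Claim_equal_sanitize_completed_py : Prop := ∀ (value : List Int), Dom_sanitize_completed_py value → Spec_sanitize_completed_py value (sanitize_completed_py value)

-- ===== LEMMAS AND PROOFS =====
-- A-side invariant: with cleaned = seen (built in lockstep from []), A's loop is a Set.add fold
-- over the non-negative elements of the rest, i.e. dedup of the filter.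
lemma saLoop_eq (rest : List Int) : ∀ acc : List Int,
    saLoop rest acc acc = (rest.filter (fun x => decide (0 ≤ x))).foldl PySem.Set.add acc := by
  induction rest with
  | nil => intro acc; simp [saLoop]
  | cons item rest ih =>
    intro acc
    by_cases hneg : item < 0
    · have : decide (0 ≤ item) = false := by simp; omega
      simp [saLoop, hneg, this, ih]
    · have h0 : decide (0 ≤ item) = true := by simp; omega
      simp only [saLoop, List.filter_cons, h0, if_true, List.foldl_cons]
      by_cases hc : PySem.Set.contains acc item = true
      · have hmem : item ∈ acc := by simpa [PySem.Set.contains] using hc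
        rw [if_pos (Or.inr hc), ih]
        congr 1
        simp [PySem.Set.add, hmem]
      · have hmem : item ∉ acc := by simpa [PySem.Set.contains] using hc
        rw [if_neg (by simp [hneg, hmem]),
            show PySem.Set.add acc item = acc ++ [item] from by simp [PySem.Set.add, hmem]]
        exact ih (acc ++ [item])

-- B-side, backward pass: the overwriting fold maps each member of l to its FIRST index.
lemma first_get? (l : List Int) : ∀ (d0 : PySem.Dict Int Int) (x : Int),
    ((PySem.List.enumerate l 0).reverse.foldl (fun d p => d.insert p.2 p.1) d0).get? x
    = if x ∈ l then (PySem.List.index? l x).map (fun n => (n : Int)) else d0.get? x := by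
  induction l using List.reverseRecOn with
  | nil => intro d0 x; simp
  | append_singleton l a ih =>
    intro d0 x
    rw [PySem.List.enumerate_append, List.reverse_append]
    simp only [PySem.List.enumerate_cons, PySem.List.enumerate_nil, List.reverse_cons,
      List.reverse_nil, List.nil_append, List.foldl_append, List.foldl_cons, List.foldl_nil]
    rw [ih]
    by_cases hxl : x ∈ l
    · rw [if_pos hxl, if_pos (List.mem_append_left _ hxl),
        PySem.List.index?_append_of_mem _ hxl]
    · rw [if_neg hxl]
      by_cases hxa : x = a
      · subst hxa
        rw [PySem.Dict.get?_insert, if_pos rfl, if_pos (by simp),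
          PySem.List.index?_append_singleton_self l x hxl]
        simp
      · rw [PySem.Dict.get?_insert, if_neg hxa, if_neg (by simp [hxl, hxa])]

-- B-side, selection pass: the positional test with the first-index of the element computes
-- dedup of the filter.
lemma alt_go (l : List Int) :
    (PySem.List.enumerate l 0).filterMap
      (fun p => if 0 ≤ p.2 ∧ (PySem.List.index? l p.2).map (fun n => (n : Int)) = some p.1
                then some p.2 else none)
    = PySem.List.dedup (l.filter (fun x => decide (0 ≤ x))) := by
  induction l using List.reverseRecOn with
  | nil => simp [PySem.List.dedup]
  | append_singleton l a ih =>
    rw [PySem.List.enumerate_append, List.filterMap_append]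
    have hcongr :
        (PySem.List.enumerate l 0).filterMap
          (fun p => if 0 ≤ p.2 ∧ (PySem.List.index? (l ++ [a]) p.2).map (fun n => (n : Int)) = some p.1
                    then some p.2 else none)
        = (PySem.List.enumerate l 0).filterMap
          (fun p => if 0 ≤ p.2 ∧ (PySem.List.index? l p.2).map (fun n => (n : Int)) = some p.1
                    then some p.2 else none) := by
      apply List.filterMap_congr
      intro p hp
      obtain ⟨k, hk, rfl⟩ := (PySem.List.mem_enumerate_iff _ _ _).mp hp
      rw [PySem.List.index?_append_of_mem _ (List.getElem_mem hk)]
    rw [hcongr, ih]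
    have hfilter : (l ++ [a]).filter (fun x => decide (0 ≤ x))
        = l.filter (fun x => decide (0 ≤ x)) ++ if 0 ≤ a then [a] else [] := by
      rw [List.filter_append]; by_cases h : 0 ≤ a <;> simp [h]
    by_cases ha : 0 ≤ a
    · by_cases hmem : a ∈ l
      · -- a already occurs: last pair is dropped, dedup absorbs the duplicate
        have hidx : PySem.List.index? (l ++ [a]) a = PySem.List.index? l a :=
          PySem.List.index?_append_of_mem _ hmem
        obtain ⟨k, hsome⟩ := Option.isSome_iff_exists.mp
          ((PySem.List.index?_isSome_iff _ _).mpr hmem)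
        obtain ⟨hklt, -, -⟩ := PySem.List.getElem_of_index?_eq_some hsome
        have hidx2 : PySem.List.index? (l ++ [a]) a = some k := hidx.trans hsome
        have hdrop :
            (PySem.List.enumerate [a] (0 + ↑l.length)).filterMap
              (fun p => if 0 ≤ p.2 ∧ (PySem.List.index? (l ++ [a]) p.2).map (fun n => (n : Int)) = some p.1
                        then some p.2 else none) = [] := by
          simp only [PySem.List.enumerate_cons, PySem.List.enumerate_nil, List.filterMap_cons,
            List.filterMap_nil, hidx2]
          rw [if_neg]
          rintro ⟨-, h⟩
          simp at h
          omega
        rw [hdrop, List.append_nil, hfilter, if_pos ha]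
        have hha : a ∈ l.filter (fun x => decide (0 ≤ x)) := by
          simp [List.mem_filter, hmem, ha]
        simp only [PySem.List.dedup_eq_ofList, PySem.Set.ofList_eq_foldl, List.foldl_append,
          List.foldl_cons, List.foldl_nil]
        rw [show ∀ s : List Int, a ∈ s → PySem.Set.add s a = s from
          fun s hs => by simp [PySem.Set.add, hs]]
        rw [← PySem.Set.ofList_eq_foldl, ← PySem.List.dedup_eq_ofList]
        exact (PySem.List.mem_dedup _ _).mpr hha
      · -- first occurrence of a: the last pair is kept, dedup appends it
        have hidx : PySem.List.index? (l ++ [a]) a = some l.length :=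
          PySem.List.index?_append_singleton_self l a hmem
        have hkeep :
            (PySem.List.enumerate [a] (0 + ↑l.length)).filterMap
              (fun p => if 0 ≤ p.2 ∧ (PySem.List.index? (l ++ [a]) p.2).map (fun n => (n : Int)) = some p.1
                        then some p.2 else none) = [a] := by
          simp only [PySem.List.enumerate_cons, PySem.List.enumerate_nil, List.filterMap_cons,
            List.filterMap_nil, hidx]
          rw [if_pos ⟨ha, by simp⟩]
        rw [hkeep, hfilter, if_pos ha]
        have hna : a ∉ l.filter (fun x => decide (0 ≤ x)) := by
          simp [List.mem_filter, hmem]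
        simp only [PySem.List.dedup_eq_ofList, PySem.Set.ofList_eq_foldl, List.foldl_append,
          List.foldl_cons, List.foldl_nil]
        rw [show PySem.Set.add ((l.filter (fun x => decide (0 ≤ x))).foldl PySem.Set.add []) a
              = ((l.filter (fun x => decide (0 ≤ x))).foldl PySem.Set.add []) ++ [a] from ?_]
        have : a ∉ ((l.filter (fun x => decide (0 ≤ x))).foldl PySem.Set.add []) := by
          rw [← PySem.Set.ofList_eq_foldl, ← PySem.List.dedup_eq_ofList]
          exact fun h => hna ((PySem.List.mem_dedup _ _).mp h)
        simp [PySem.Set.add, this]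
    · -- negative a: dropped on both sides
      have hdrop :
          (PySem.List.enumerate [a] (0 + ↑l.length)).filterMap
            (fun p => if 0 ≤ p.2 ∧ (PySem.List.index? (l ++ [a]) p.2).map (fun n => (n : Int)) = some p.1
                      then some p.2 else none) = [] := by
        simp [PySem.List.enumerate_cons, PySem.List.enumerate_nil, ha]
      rw [hdrop, List.append_nil, hfilter, if_neg ha, List.append_nil]

-- ===== VERDICT (by name: the statement is the Claim_ definition above) =====
theorem sanitize_completed_py_spec : Claim_equal_sanitize_completed_py := by
  intro value _
  show sanitize_completed_py value = sanitize_completed_py_alt value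
  rw [sanitize_completed_py, sanitize_completed_py_alt]
  simp only [PySem.List.foldl_append_singleton, List.nil_append]
  have hbridge :
      (PySem.List.enumerate value 0).filterMap
        (fun p => if 0 ≤ p.2 ∧ ((PySem.List.enumerate value 0).reverse.foldl
              (fun d p => d.insert p.2 p.1) PySem.Dict.empty).get? p.2 = some p.1
                  then some p.2 else none)
      = (PySem.List.enumerate value 0).filterMap
        (fun p => if 0 ≤ p.2 ∧ (PySem.List.index? value p.2).map (fun n => (n : Int)) = some p.1
                  then some p.2 else none) := by
    apply List.filterMap_congr
    intro p hp
    obtain ⟨k, hk, rfl⟩ := (PySem.List.mem_enumerate_iff _ _ _).mp hp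
    rw [first_get? value PySem.Dict.empty _, if_pos (List.getElem_mem hk)]
  rw [hbridge, alt_go value, PySem.List.dedup_eq_ofList, PySem.Set.ofList_eq_foldl]
  exact saLoop_eq value []
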